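-- pv_equiv track=rewrite | github.com/timini/neuromem | packages/neuromem-bench/scripts/quality_binary_tower_audit.py | _next_only_centroid_child_idx
-- ===== SOURCE A (Python) =====
-- def _immediate_children(parsed: list[tuple[int, bool]], parent_idx: int) -> list[tuple[int, bool]]:
--     """Return the immediate children (depth = parent_depth + 1) of the
--     centroid at ``parent_idx``, stopping when we exit the subtree.
--     """
--     parent_depth = parsed[parent_idx][0]
--     children: list[tuple[int, bool]] = []
--     for j in range(parent_idx + 1, len(parsed)):
--         d_j, is_c_j = parsed[j]
--         if d_j <= parent_depth:
--             break
--         if d_j == parent_depth + 1: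
--             children.append((d_j, is_c_j))
--     return children
--
-- def _next_only_centroid_child_idx(parsed: list[tuple[int, bool]], parent_idx: int) -> int | None:
--     """If the centroid at parent_idx has exactly one centroid child,
--     return that child's index; otherwise None."""
--     children = _immediate_children(parsed, parent_idx)
--     if len(children) != 1 or not children[0][1]:
--         return None
--     parent_depth = parsed[parent_idx][0]
--     for j in range(parent_idx + 1, len(parsed)):
--         if parsed[j][0] == parent_depth + 1:
--             return j
--     return None
-- ===== SOURCE B (Python) =====
-- def _next_only_centroid_child_idx(parsed: list[tuple[int, bool]], parent_idx: int) -> int | None: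
--     """Single pass: count the depth+1 children inside the subtree and remember
--     the first one's index; answer directly from that state."""
--     parent_depth = parsed[parent_idx][0]
--     count = 0
--     first = None  # (index, is_centroid) of the first immediate child
--     for j in range(parent_idx + 1, len(parsed)):
--         d_j, is_c_j = parsed[j]
--         if d_j <= parent_depth:
--             break
--         if d_j == parent_depth + 1:
--             count += 1
--             if first is None:
--                 first = (j, is_c_j)
--     if count == 1 and first[1]:
--         return first[0]
--     return None
-- ===== Notes on version B (the rewrite author's own statement) =====
-- stated objective: simpler
-- what changed: B replaces A's two phases (build the full immediate-children list via a helper, then re-scan from parent_idx+1 to locate the child's index) with one combined scan tracking a count and the first depth+1 child's index, answering directly from that state; the helper and the second scan disappear.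
import Mathlib
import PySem

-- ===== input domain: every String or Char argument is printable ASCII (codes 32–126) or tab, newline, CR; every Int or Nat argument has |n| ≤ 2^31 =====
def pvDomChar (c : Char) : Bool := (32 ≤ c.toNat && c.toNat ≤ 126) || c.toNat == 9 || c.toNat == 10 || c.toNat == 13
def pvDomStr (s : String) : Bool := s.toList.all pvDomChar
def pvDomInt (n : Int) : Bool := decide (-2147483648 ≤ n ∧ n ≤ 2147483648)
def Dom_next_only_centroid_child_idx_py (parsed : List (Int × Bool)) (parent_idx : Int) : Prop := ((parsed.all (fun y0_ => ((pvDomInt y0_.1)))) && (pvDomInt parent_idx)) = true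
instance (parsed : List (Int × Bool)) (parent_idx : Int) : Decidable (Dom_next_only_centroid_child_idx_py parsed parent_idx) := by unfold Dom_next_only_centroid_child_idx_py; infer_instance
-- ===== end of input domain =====

-- B replaces A's build-children-list-then-rescan with one combined scan tracking the count and the
-- first depth+1 child's index (objective: simpler).

-- ===== PORT A =====
-- helper _immediate_children's loop: collect (d_j, is_c_j) at depth pd+1, break at d_j ≤ pd
def pvA_children (parsed : List (Int × Bool)) (pd : Int) : List Int → List (Int × Bool)
  | [] => []
  | j :: js =>
    match PySem.List.pyGet? parsed j with
    | none => []   -- unreachable: j drawn from range(parent_idx+1, len(parsed))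
    | some (d, c) =>
      if d ≤ pd then []
      else if d = pd + 1 then (d, c) :: pvA_children parsed pd js
      else pvA_children parsed pd js

-- A's second loop: first j with parsed[j][0] == pd+1 (no break)
def pvA_find (parsed : List (Int × Bool)) (pd : Int) : List Int → Option Int
  | [] => none
  | j :: js =>
    match PySem.List.pyGet? parsed j with
    | none => pvA_find parsed pd js   -- unreachable
    | some (d, _) => if d = pd + 1 then some j else pvA_find parsed pd js

def next_only_centroid_child_idx_py (parsed : List (Int × Bool)) (parent_idx : Int) : Option Int :=
  match PySem.List.pyGet? parsed parent_idx with
  | none => none   -- Python raises IndexError here; excluded by Pre_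
  | some (pd, _) =>
    let rng := PySem.List.pyRange (parent_idx + 1) (PySem.List.len parsed) 1
    let children := pvA_children parsed pd rng
    if children.length ≠ 1 then none
    else if !(children.headD (0, false)).2 then none
    else pvA_find parsed pd rng

-- ===== PORT B =====
-- B's single loop: state (count, first) where first is the first (index, is_centroid) at depth pd+1
def pvB_loop (parsed : List (Int × Bool)) (pd : Int) : List Int → Int → Option (Int × Bool) → Int × Option (Int × Bool)
  | [], cnt, first => (cnt, first)
  | j :: js, cnt, first =>
    match PySem.List.pyGet? parsed j with
    | none => (cnt, first)   -- unreachable: j drawn from range(parent_idx+1, len(parsed))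
    | some (d, c) =>
      if d ≤ pd then (cnt, first)
      else if d = pd + 1 then pvB_loop parsed pd js (cnt + 1) (if first = none then some (j, c) else first)
      else pvB_loop parsed pd js cnt first

def next_only_centroid_child_idx_py_alt (parsed : List (Int × Bool)) (parent_idx : Int) : Option Int :=
  match PySem.List.pyGet? parsed parent_idx with
  | none => none   -- Python raises IndexError here; excluded by Pre_
  | some (pd, _) =>
    match pvB_loop parsed pd (PySem.List.pyRange (parent_idx + 1) (PySem.List.len parsed) 1) 0 none with
    | (cnt, some (j, c)) => if cnt = 1 && c then some j else none
    | (_, none) => none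

-- ===== PRECONDITION & SPEC =====
-- Pre_: parsed[parent_idx] must not raise IndexError (Python's negative-index rule)
def Pre_next_only_centroid_child_idx_py (parsed : List (Int × Bool)) (parent_idx : Int) : Prop :=
  PySem.Raise.InRange parsed.length parent_idx
instance (parsed : List (Int × Bool)) (parent_idx : Int) : Decidable (Pre_next_only_centroid_child_idx_py parsed parent_idx) := by unfold Pre_next_only_centroid_child_idx_py; infer_instance
def pvWitness_next_only_centroid_child_idx_py : (List (Int × Bool)) × Int := ([(0, true), (1, true)], 0)

def Spec_next_only_centroid_child_idx_py (parsed : List (Int × Bool)) (parent_idx : Int) (out : Option Int) : Prop := out = next_only_centroid_child_idx_py_alt parsed parent_idx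
instance (parsed : List (Int × Bool)) (parent_idx : Int) (out : Option Int) : Decidable (Spec_next_only_centroid_child_idx_py parsed parent_idx out) := by unfold Spec_next_only_centroid_child_idx_py; infer_instance

-- ===== CLAIM (what is proved, stated in full; the proofs are below) =====
def Claim_equal_next_only_centroid_child_idx_py : Prop := ∀ (parsed : List (Int × Bool)) (parent_idx : Int), Dom_next_only_centroid_child_idx_py parsed parent_idx → Pre_next_only_centroid_child_idx_py parsed parent_idx → Spec_next_only_centroid_child_idx_py parsed parent_idx (next_only_centroid_child_idx_py parsed parent_idx)

-- ===== LEMMAS AND PROOFS =====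

-- proof-side view of the shared scan: the (index, is_centroid) pairs of the depth pd+1 nodes before the break
def pvM (parsed : List (Int × Bool)) (pd : Int) : List Int → List (Int × Bool)
  | [] => []
  | j :: js =>
    match PySem.List.pyGet? parsed j with
    | none => []
    | some (d, c) =>
      if d ≤ pd then []
      else if d = pd + 1 then (j, c) :: pvM parsed pd js
      else pvM parsed pd js

lemma pvA_children_eq_map (parsed : List (Int × Bool)) (pd : Int) (L : List Int) :
    pvA_children parsed pd L = (pvM parsed pd L).map (fun p => (pd + 1, p.2)) := by
  induction L with
  | nil => simp [pvA_children, pvM]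
  | cons j js ih =>
    simp only [pvA_children, pvM]
    cases h : PySem.List.pyGet? parsed j with
    | none => simp
    | some dc =>
      obtain ⟨d, c⟩ := dc
      by_cases h1 : d ≤ pd
      · simp [h1]
      · by_cases h2 : d = pd + 1
        · simp [h2, ih]
        · simp [h1, h2, ih]

lemma pvB_loop_eq (parsed : List (Int × Bool)) (pd : Int) (L : List Int) :
    ∀ (cnt : Int) (first : Option (Int × Bool)),
      pvB_loop parsed pd L cnt first = (cnt + (pvM parsed pd L).length, first.or (pvM parsed pd L).head?) := by
  induction L with
  | nil => intro cnt first; simp [pvB_loop, pvM]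
  | cons j js ih =>
    intro cnt first
    simp only [pvB_loop, pvM]
    cases h : PySem.List.pyGet? parsed j with
    | none => simp
    | some dc =>
      obtain ⟨d, c⟩ := dc
      by_cases h1 : d ≤ pd
      · simp [h1]
      · by_cases h2 : d = pd + 1
        · simp only [h2, ih]
          cases first with
          | none => simp; omega
          | some x => simp; omega
        · simp [h1, h2, ih]

lemma pvA_find_head (parsed : List (Int × Bool)) (pd : Int) (L : List Int) :
    ∀ (p : Int × Bool) (ps : List (Int × Bool)), pvM parsed pd L = p :: ps →
      pvA_find parsed pd L = some p.1 := by
  induction L with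
  | nil => intro p ps h; simp [pvM] at h
  | cons j js ih =>
    intro p ps h
    simp only [pvM] at h
    simp only [pvA_find]
    cases hg : PySem.List.pyGet? parsed j with
    | none => simp [hg] at h
    | some dc =>
      obtain ⟨d, c⟩ := dc
      rw [hg] at h
      by_cases h1 : d ≤ pd
      · simp [h1] at h
      · by_cases h2 : d = pd + 1
        · simp [h2] at h
          simp [h2, ← h.1]
        · simp [h1, h2] at h
          simp [h2, ih p ps h]

-- ===== VERDICT (by name: the statement is the Claim_ definition above) =====
theorem next_only_centroid_child_idx_py_spec : Claim_equal_next_only_centroid_child_idx_py := by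
  intro parsed parent_idx _ _
  unfold Spec_next_only_centroid_child_idx_py next_only_centroid_child_idx_py next_only_centroid_child_idx_py_alt
  cases hg : PySem.List.pyGet? parsed parent_idx with
  | none => rfl
  | some pdc =>
    obtain ⟨pd, _⟩ := pdc
    simp only [pvA_children_eq_map, pvB_loop_eq]
    cases hm : pvM parsed pd (PySem.List.pyRange (parent_idx + 1) (PySem.List.len parsed) 1) with
    | nil => simp
    | cons p ps =>
      obtain ⟨j0, c0⟩ := p
      cases ps with
      | nil =>
        have hfind := pvA_find_head parsed pd _ (j0, c0) [] hm
        simp only [PySem.List.len_eq] at hfind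
        cases c0 <;> simp [hfind]
      | cons q qs =>
        simp
        intro h
        exact absurd h (by omega)
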